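-- pv_equiv track=rewrite | github.com/AyoGG123/electra_grammar_detection | app/__init__.py | get_test_dataloader
-- ===== SOURCE A (Python) =====
-- def get_test_dataloader(inputs, attention_mask):
--     expand_dim = lambda tlist, x: [tlist[i:i + x] for i in range(0, len(tlist), x)]
--     inputs = expand_dim(inputs, 64)
--     attention_mask = expand_dim(attention_mask, 64)
--     dataset = []
--     for i, k in zip(inputs, attention_mask):
--         dataset.append(tuple((i, k)))
--     return dataset
-- ===== SOURCE B (Python) =====
-- def get_test_dataloader(inputs, attention_mask):
--     dataset = []
--     n = min(len(inputs), len(attention_mask))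
--     for i in range(0, n, 64):
--         dataset.append((inputs[i:i + 64], attention_mask[i:i + 64]))
--     return dataset
-- ===== Notes on version B (the rewrite author's own statement) =====
-- stated objective: simpler
-- what changed: B makes one index-driven pass appending (inputs[i:i+64], mask[i:i+64]) directly up to min(len(inputs), len(attention_mask)), instead of materializing two chunk-lists and zipping them.
import Mathlib
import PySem

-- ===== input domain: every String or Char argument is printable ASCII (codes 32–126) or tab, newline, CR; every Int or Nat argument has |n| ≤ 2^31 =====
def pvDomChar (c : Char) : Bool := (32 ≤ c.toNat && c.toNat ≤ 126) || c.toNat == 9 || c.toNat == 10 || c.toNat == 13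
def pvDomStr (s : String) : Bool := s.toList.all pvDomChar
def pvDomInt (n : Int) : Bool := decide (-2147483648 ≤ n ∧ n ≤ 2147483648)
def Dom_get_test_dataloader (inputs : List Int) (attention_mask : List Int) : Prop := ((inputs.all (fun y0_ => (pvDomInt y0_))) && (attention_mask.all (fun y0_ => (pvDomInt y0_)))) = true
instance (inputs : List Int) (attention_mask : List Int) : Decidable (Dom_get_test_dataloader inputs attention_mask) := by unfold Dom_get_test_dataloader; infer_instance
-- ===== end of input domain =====

-- B replaces A's chunk-both-lists-then-zip with a single index-driven pass up to
-- min(len(inputs), len(attention_mask)) that appends the pair of slices directly (simpler decomposition).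

-- ===== PORT A =====
-- expand_dim = lambda tlist, x: [tlist[i:i + x] for i in range(0, len(tlist), x)]
def pvExpandDim (tlist : List Int) (x : Int) : List (List Int) :=
  (PySem.List.pyRange 0 (tlist.length : Int) x).map
    (fun i => PySem.List.slice tlist (some i) (some (i + x)))

def get_test_dataloader (inputs : List Int) (attention_mask : List Int) : List (List Int × List Int) :=
  let inputs' := pvExpandDim inputs 64
  let attention_mask' := pvExpandDim attention_mask 64
  -- for i, k in zip(inputs, attention_mask): dataset.append(tuple((i, k)))
  (inputs'.zip attention_mask').foldl (fun dataset ik => dataset ++ [ik]) []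

-- ===== PORT B =====
def get_test_dataloader_alt (inputs : List Int) (attention_mask : List Int) : List (List Int × List Int) :=
  let n : Int := ((min inputs.length attention_mask.length : Nat) : Int)
  (PySem.List.pyRange 0 n 64).foldl
    (fun dataset i =>
      dataset ++ [(PySem.List.slice inputs (some i) (some (i + 64)),
                   PySem.List.slice attention_mask (some i) (some (i + 64)))]) []

-- ===== PRECONDITION & SPEC =====
def Spec_get_test_dataloader (inputs : List Int) (attention_mask : List Int) (out : List (List Int × List Int)) : Prop := out = get_test_dataloader_alt inputs attention_mask
instance (inputs : List Int) (attention_mask : List Int) (out : List (List Int × List Int)) : Decidable (Spec_get_test_dataloader inputs attention_mask out) := by unfold Spec_get_test_dataloader; infer_instance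

-- ===== CLAIM (what is proved, stated in full; the proofs are below) =====
def Claim_equal_get_test_dataloader : Prop := ∀ (inputs : List Int) (attention_mask : List Int), Dom_get_test_dataloader inputs attention_mask → Spec_get_test_dataloader inputs attention_mask (get_test_dataloader inputs attention_mask)

-- ===== LEMMAS AND PROOFS =====

-- foldl-append is the identity / a map
theorem pv_foldl_append_id {α : Type} :
    ∀ (l : List α) (acc : List α),
      l.foldl (fun ds x => ds ++ [x]) acc = acc ++ l := by
  intro l
  induction l with
  | nil => simp
  | cons a t ih => intro acc; simp [List.foldl, ih]

theorem pv_foldl_append {α β : Type} (h : α → β) :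
    ∀ (l : List α) (acc : List β),
      l.foldl (fun ds x => ds ++ [h x]) acc = acc ++ l.map h := by
  intro l
  induction l with
  | nil => simp
  | cons a t ih => intro acc; simp [List.foldl, ih]

-- the number of chunks Python's range(0, n, 64) produces
def pvCnt (n : Nat) : Nat := (((n : Int) + 63) / 64).toNat

theorem pv_pyRange64 (n : Nat) :
    PySem.List.pyRange 0 (n : Int) 64 =
      (List.range (pvCnt n)).map (fun k : Nat => (64 : Int) * (k : Int)) := by
  rw [PySem.List.pyRange_of_pos 0 (n : Int) (by norm_num)]
  have harith : ((n : Int) - 0 + 64 - 1) = (n : Int) + 63 := by ring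
  rw [harith]
  have hcnt : (if (0 : Int) < (n : Int) then (((n : Int) + 63) / 64).toNat else 0) = pvCnt n := by
    unfold pvCnt
    split_ifs with h
    · rfl
    · have : n = 0 := by omega
      subst this; decide
  rw [hcnt]
  apply List.map_congr_left
  intro k _
  simp

theorem pv_cnt_mono {m n : Nat} (h : m ≤ n) : pvCnt m ≤ pvCnt n := by
  unfold pvCnt
  have := Int.ediv_le_ediv (a := (m : Int) + 63) (b := (n : Int) + 63) (c := 64)
    (by norm_num) (by omega)
  omega

theorem pv_cnt_min (m n : Nat) : pvCnt (min m n) = min (pvCnt m) (pvCnt n) := by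
  rcases le_total m n with h | h
  · rw [Nat.min_eq_left h, Nat.min_eq_left (pv_cnt_mono h)]
  · rw [Nat.min_eq_right h, Nat.min_eq_right (pv_cnt_mono h)]

theorem pv_zip_map_range {α β : Type} (f : Nat → α) (g : Nat → β) (m n : Nat) :
    ((List.range m).map f).zip ((List.range n).map g) =
      (List.range (min m n)).map (fun k => (f k, g k)) := by
  apply List.ext_getElem
  · simp
  · intro i h1 h2
    simp

-- ===== VERDICT (by name: the statement is the Claim_ definition above) =====
theorem get_test_dataloader_spec : Claim_equal_get_test_dataloader := by
  intro inputs attention_mask _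
  unfold Spec_get_test_dataloader get_test_dataloader get_test_dataloader_alt pvExpandDim
  dsimp only
  rw [pv_pyRange64 inputs.length, pv_pyRange64 attention_mask.length,
      pv_pyRange64 (min inputs.length attention_mask.length)]
  rw [List.map_map, List.map_map]
  rw [pv_zip_map_range, pv_cnt_min]
  rw [pv_foldl_append_id]
  rw [pv_foldl_append]
  rw [List.map_map]
  simp [Function.comp]
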